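-- pv_equiv track=rewrite | github.com/CMDRZero/ReprLang | replang.py | ftk
-- ===== SOURCE A (Python) =====
-- def ftk(txt,tks):
--     o=set()
--     l=0
--     for tk in tks:
--         if txt[:len(tk)]==tk:
-- ##            o.add(tk)
--             if len(tk)>l:
--                 o=set([tk])
--                 l=len(tk)
--     return(list(o))
-- ===== SOURCE B (Python) =====
-- def ftk(txt, tks):
--     candidates = [tk for tk in tks if tk and txt.startswith(tk)]
--     return [max(candidates, key=len)] if candidates else []
-- ===== Notes on version B (the rewrite author's own statement) =====
-- stated objective: simpler
-- what changed: Replaces the running set/length state machine with a two-pass decomposition: filter the non-empty tokens that prefix txt, then take the first length-maximal candidate with max(key=len).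
import Mathlib
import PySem

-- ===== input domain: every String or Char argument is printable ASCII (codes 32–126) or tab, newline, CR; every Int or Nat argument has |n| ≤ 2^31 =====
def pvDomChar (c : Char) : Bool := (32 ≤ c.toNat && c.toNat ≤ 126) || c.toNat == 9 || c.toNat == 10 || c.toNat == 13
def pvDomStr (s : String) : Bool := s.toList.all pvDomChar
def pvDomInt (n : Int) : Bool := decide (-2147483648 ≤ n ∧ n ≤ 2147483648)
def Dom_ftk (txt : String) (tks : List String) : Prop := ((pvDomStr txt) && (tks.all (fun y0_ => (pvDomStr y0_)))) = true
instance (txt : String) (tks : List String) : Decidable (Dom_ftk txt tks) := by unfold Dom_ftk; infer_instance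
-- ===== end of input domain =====

-- B replaces A's running set/length state machine by a two-pass decomposition
-- (filter the matching tokens, then take the first length-maximal one): simpler, same cost.

-- ===== PORT A =====
-- o=set(); l=0; for tk in tks: if txt[:len(tk)]==tk: if len(tk)>l: o=set([tk]); l=len(tk); return list(o)
def ftk (txt : String) (tks : List String) : List String :=
  (tks.foldl
    (fun (st : PySem.Set String × Int) tk =>
      if PySem.Str.slice txt none (some (PySem.Str.len tk)) = tk then
        if PySem.Str.len tk > st.2 then (PySem.Set.ofList [tk], PySem.Str.len tk) else st
      else st)
    ((PySem.Set.ofList [] : PySem.Set String), (0 : Int))).1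

-- ===== PORT B =====
-- candidates = [tk for tk in tks if tk and txt.startswith(tk)]; return [max(candidates, key=len)] if candidates else []
def ftk_alt (txt : String) (tks : List String) : List String :=
  let candidates := tks.filter (fun tk => !(tk == "") && PySem.Str.startswith txt tk)
  match PySem.List.max? candidates (fun tk => PySem.Str.len tk) with
  | some m => [m]
  | none => []

-- ===== PRECONDITION & SPEC =====
def Spec_ftk (txt : String) (tks : List String) (out : List String) : Prop := out = ftk_alt txt tks
instance (txt : String) (tks : List String) (out : List String) : Decidable (Spec_ftk txt tks out) := by unfold Spec_ftk; infer_instance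

-- ===== CLAIM (what is proved, stated in full; the proofs are below) =====
def Claim_equal_ftk : Prop := ∀ (txt : String) (tks : List String), Dom_ftk txt tks → Spec_ftk txt tks (ftk txt tks)

-- ===== LEMMAS AND PROOFS =====

-- the state of A's loop as a function of the current best candidate (none = no match yet)
def pvStOf : Option String → PySem.Set String × Int
  | none => ((PySem.Set.ofList [] : PySem.Set String), (0 : Int))
  | some m => (PySem.Set.ofList [m], PySem.Str.len m)

theorem pvSliceTake (txt tk : String) :
    (PySem.Str.slice txt none (some (PySem.Str.len tk))).toList
      = txt.toList.take tk.toList.length := by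
  rw [PySem.Str.toList_slice, PySem.Chars.slice_eq_listSlice, PySem.Str.len_eq,
      PySem.List.slice_to_natCast]

theorem pvPrefix_iff (txt tk : String) :
    (PySem.Str.slice txt none (some (PySem.Str.len tk)) = tk)
      ↔ PySem.Str.startswith txt tk = true := by
  rw [PySem.Str.startswith_eq, PySem.Chars.startswith_iff, List.prefix_iff_eq_take]
  constructor
  · intro h
    have := congrArg String.toList h
    rw [pvSliceTake] at this
    exact this.symm
  · intro h
    have := (pvSliceTake txt tk).trans h.symm
    exact String.toList_inj.mp this

theorem pvLen_pos (tk : String) (h : tk ≠ "") : 0 < PySem.Str.len tk := by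
  rw [PySem.Str.len_eq]
  have h1 : tk.toList ≠ [] := fun hn => h (by simpa using congrArg String.ofList hn)
  have h2 : 0 < tk.toList.length := List.length_pos_iff.mpr h1
  omega

theorem pvFold_eq (txt : String) : ∀ (tks : List String) (acc : Option String),
    (∀ m, acc = some m → 0 < PySem.Str.len m) →
    tks.foldl
      (fun (st : PySem.Set String × Int) tk =>
        if PySem.Str.slice txt none (some (PySem.Str.len tk)) = tk then
          if PySem.Str.len tk > st.2 then (PySem.Set.ofList [tk], PySem.Str.len tk) else st
        else st)
      (pvStOf acc)
    = pvStOf ((tks.filter (fun tk => !(tk == "") && PySem.Str.startswith txt tk)).foldl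
        (fun acc x => match acc with
          | none => some x
          | some m => if PySem.Str.len m < PySem.Str.len x then some x else some m) acc) := by
  intro tks
  induction tks with
  | nil => intro acc _; simp
  | cons tk t ih =>
    intro acc hacc
    rw [List.foldl_cons, List.filter_cons]
    by_cases hne : tk = ""
    · subst hne
      have hc : PySem.Str.slice txt none (some (PySem.Str.len "")) = "" := by
        rw [pvPrefix_iff, PySem.Str.startswith_eq, PySem.Chars.startswith_iff]
        simp
      rw [if_pos hc]
      have hlen0 : PySem.Str.len "" = 0 := by rw [PySem.Str.len_eq]; rfl
      have hnn : 0 ≤ (pvStOf acc).2 := by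
        cases acc with
        | none => simp [pvStOf]
        | some m => have := hacc m rfl; simp only [pvStOf]; omega
      have h0 : ¬ PySem.Str.len "" > (pvStOf acc).2 := by omega
      rw [if_neg h0]
      simpa using ih acc hacc
    · by_cases hsw : PySem.Str.startswith txt tk = true
      · have hc := (pvPrefix_iff txt tk).mpr hsw
        rw [if_pos hc]
        have hsw' : PySem.Chars.startswith txt.toList tk.toList = true := by
          rw [← PySem.Str.startswith_eq]; exact hsw
        have hfilter : (!(tk == "") && PySem.Str.startswith txt tk) = true := by
          simp [hne, hsw']
        rw [if_pos hfilter, List.foldl_cons]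
        cases acc with
        | none =>
          have hpos : PySem.Str.len tk > (pvStOf (none : Option String)).2 := by
            simpa [pvStOf] using pvLen_pos tk hne
          rw [if_pos hpos]
          exact ih (some tk) (by intro m hm; cases hm; exact pvLen_pos tk hne)
        | some m =>
          by_cases hlt : PySem.Str.len m < PySem.Str.len tk
          · have : PySem.Str.len tk > (pvStOf (some m)).2 := by simpa [pvStOf] using hlt
            rw [if_pos this]
            simp only [hlt, if_pos]
            exact ih (some tk) (by intro m' hm'; cases hm'; exact pvLen_pos tk hne)
          · have : ¬ PySem.Str.len tk > (pvStOf (some m)).2 := by simpa [pvStOf] using hlt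
            rw [if_neg this]
            simp only [hlt, if_false]
            exact ih (some m) hacc
      · have hc : ¬ PySem.Str.slice txt none (some (PySem.Str.len tk)) = tk := by
          rw [pvPrefix_iff]; exact hsw
        rw [if_neg hc]
        have hsw' : PySem.Chars.startswith txt.toList tk.toList = false := by
          rw [← PySem.Str.startswith_eq]; simpa using hsw
        have hfilter : ¬ (!(tk == "") && PySem.Str.startswith txt tk) = true := by
          simp [hsw']
        rw [if_neg hfilter]
        exact ih acc hacc

-- ===== VERDICT (by name: the statement is the Claim_ definition above) =====
theorem ftk_spec : Claim_equal_ftk := by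
  intro txt tks _
  unfold Spec_ftk
  have h : ftk txt tks
      = (pvStOf ((tks.filter (fun tk => !(tk == "") && PySem.Str.startswith txt tk)).foldl
          (fun acc x => match acc with
            | none => some x
            | some m => if PySem.Str.len m < PySem.Str.len x then some x else some m) none)).1 := by
    unfold ftk
    have hfe := pvFold_eq txt tks none (fun m hm => by cases hm)
    rw [show pvStOf none = ((PySem.Set.ofList [] : PySem.Set String), (0 : Int)) from rfl] at hfe
    rw [hfe]
  rw [h]
  have hmax : PySem.List.max? (tks.filter (fun tk => !(tk == "") && PySem.Str.startswith txt tk))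
        (fun tk => PySem.Str.len tk)
      = (tks.filter (fun tk => !(tk == "") && PySem.Str.startswith txt tk)).foldl
          (fun acc x => match acc with
            | none => some x
            | some m => if PySem.Str.len m < PySem.Str.len x then some x else some m) none := by
    delta PySem.List.max?
    congr 1
    funext acc x
    cases acc <;> rfl
  rw [← hmax]
  unfold ftk_alt
  show (pvStOf (PySem.List.max? (tks.filter (fun tk => !(tk == "") && PySem.Str.startswith txt tk))
        (fun tk => PySem.Str.len tk))).1
      = match PySem.List.max? (tks.filter (fun tk => !(tk == "") && PySem.Str.startswith txt tk))
          (fun tk => PySem.Str.len tk) with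
        | some m => [m]
        | none => []
  cases hres : PySem.List.max? (tks.filter (fun tk => !(tk == "") && PySem.Str.startswith txt tk))
      (fun tk => PySem.Str.len tk) with
  | none => simp [pvStOf, PySem.Set.ofList, PySem.Set.empty]
  | some m => simp [pvStOf, PySem.Set.ofList, PySem.Set.empty, PySem.Set.add]
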